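-- pv_equiv track=rewrite | github.com/z-anderson/bc18-scaffold | L1-10/e6s.py | lineInd
-- ===== SOURCE A (Python) =====
-- def lineInd(start,end):
-- 	currentPoint=start
-- 	ptlist=[currentPoint]
-- 	while(currentPoint!=end):
-- 		closestDist=1000000
-- 		for n in orthoNeighbors(currentPoint):
-- 			ndist2=dist2(n,end)
-- 			if ndist2<closestDist:
-- 				closestDist=ndist2
-- 				closestn=n
-- 		currentPoint=closestn
-- 		ptlist.append(currentPoint)
-- 	return ptlist
--
-- def dist2(start,end):
-- 	return (end[0]-start[0])**2+(end[1]-start[1])**2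
--
-- def orthoNeighbors(pt):
-- 	return [(pt[0]-1,pt[1]),(pt[0]+1,pt[1]),(pt[0],pt[1]-1),(pt[0],pt[1]+1)]
-- ===== SOURCE B (Python) =====
-- def lineInd(start, end):
--     # simpler: direct arithmetic step toward end instead of 4-neighbor min-scan
--     x, y = start
--     ex, ey = end
--     ptlist = [start]
--     while (x, y) != (ex, ey):
--         dx = ex - x
--         dy = ey - y
--         if abs(dx) >= abs(dy):
--             x += 1 if dx > 0 else -1
--         else:
--             y += 1 if dy > 0 else -1
--         ptlist.append((x, y))
--     return ptlist
-- ===== Notes on version B (the rewrite author's own statement) =====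
-- stated objective: simpler
-- what changed: B drops A's inner 4-neighbor squared-distance min-scan entirely and instead computes dx,dy each iteration and steps one unit along the axis with the larger remaining |delta| (x on ties), which is exactly the neighbor A's first-wins min-scan selects.
import Mathlib
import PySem

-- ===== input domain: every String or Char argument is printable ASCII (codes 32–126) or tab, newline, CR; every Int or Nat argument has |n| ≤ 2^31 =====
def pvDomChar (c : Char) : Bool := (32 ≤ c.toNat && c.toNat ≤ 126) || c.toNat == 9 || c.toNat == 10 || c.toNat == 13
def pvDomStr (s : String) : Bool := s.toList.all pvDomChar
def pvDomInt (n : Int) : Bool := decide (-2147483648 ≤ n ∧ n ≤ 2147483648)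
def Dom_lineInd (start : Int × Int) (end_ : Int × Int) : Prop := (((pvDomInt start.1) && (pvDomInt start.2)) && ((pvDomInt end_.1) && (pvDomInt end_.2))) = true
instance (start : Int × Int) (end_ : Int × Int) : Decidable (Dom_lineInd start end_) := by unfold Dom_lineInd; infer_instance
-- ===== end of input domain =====

-- B replaces A's 4-neighbor squared-distance min-scan with one arithmetic step toward the end point (simpler).


-- ===== PORT A =====
def dist2A (start : Int × Int) (end_ : Int × Int) : Int :=
  (end_.1 - start.1) ^ 2 + (end_.2 - start.2) ^ 2

def orthoNeighborsA (pt : Int × Int) : List (Int × Int) :=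
  [(pt.1 - 1, pt.2), (pt.1 + 1, pt.2), (pt.1, pt.2 - 1), (pt.1, pt.2 + 1)]

-- the inner `for n in orthoNeighbors: if ndist2 < closestDist: …` scan;
-- `closestn` starts unbound in Python, hence the Option (none = unbound, a NameError if used)
def lineIndScan (end_ : Int × Int) (p : Int × Int) : Int × Option (Int × Int) :=
  (orthoNeighborsA p).foldl
    (fun s n =>
      let ndist2 := dist2A n end_
      if ndist2 < s.1 then (ndist2, some n) else s)
    (1000000, none)

-- the outer while loop; fuel only makes the same computation total (inside Pre_ each
-- iteration moves one step closer, so the L1 distance is exactly enough fuel)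
def lineIndGo (end_ : Int × Int) : Nat → (Int × Int) → List (Int × Int) → List (Int × Int)
  | fuel, p, acc =>
    if p = end_ then acc
    else
      match fuel with
      | 0 => acc
      | fuel + 1 =>
        match (lineIndScan end_ p).2 with
        | none => acc   -- Python raises NameError here; excluded by Pre_
        | some c => lineIndGo end_ fuel c (acc ++ [c])

def lineInd (start : Int × Int) (end_ : Int × Int) : List (Int × Int) :=
  lineIndGo end_ ((end_.1 - start.1).natAbs + (end_.2 - start.2).natAbs) start [start]

-- ===== PORT B =====
def lineStep (end_ : Int × Int) (p : Int × Int) : Int × Int :=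
  let dx := end_.1 - p.1
  let dy := end_.2 - p.2
  if |dy| ≤ |dx| then (p.1 + (if 0 < dx then 1 else -1), p.2)
  else (p.1, p.2 + (if 0 < dy then 1 else -1))

def lineIndAltGo (end_ : Int × Int) : Nat → (Int × Int) → List (Int × Int) → List (Int × Int)
  | fuel, p, acc =>
    if p = end_ then acc
    else
      match fuel with
      | 0 => acc
      | fuel + 1 =>
        let c := lineStep end_ p
        lineIndAltGo end_ fuel c (acc ++ [c])

def lineInd_alt (start : Int × Int) (end_ : Int × Int) : List (Int × Int) :=
  lineIndAltGo end_ ((end_.1 - start.1).natAbs + (end_.2 - start.2).natAbs) start [start]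

-- ===== PRECONDITION & SPEC =====
-- Pre_ excludes exactly the inputs on which A raises NameError (`closestn` never assigned):
-- start ≠ end and every orthogonal neighbor of start has squared distance to end ≥ 1000000.
def Pre_lineInd (start : Int × Int) (end_ : Int × Int) : Prop :=
  start = end_ ∨
    min (min ((end_.1 - start.1 + 1) ^ 2 + (end_.2 - start.2) ^ 2)
             ((end_.1 - start.1 - 1) ^ 2 + (end_.2 - start.2) ^ 2))
        (min ((end_.1 - start.1) ^ 2 + (end_.2 - start.2 + 1) ^ 2)
             ((end_.1 - start.1) ^ 2 + (end_.2 - start.2 - 1) ^ 2)) < 1000000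

instance (start : Int × Int) (end_ : Int × Int) : Decidable (Pre_lineInd start end_) := by
  unfold Pre_lineInd; infer_instance

def pvWitness_lineInd : (Int × Int) × (Int × Int) := ((2, 3), (7, 1))

def Spec_lineInd (start : Int × Int) (end_ : Int × Int) (out : List (Int × Int)) : Prop :=
  out = lineInd_alt start end_

instance (start : Int × Int) (end_ : Int × Int) (out : List (Int × Int)) : Decidable (Spec_lineInd start end_ out) := by
  unfold Spec_lineInd; infer_instance

-- ===== CLAIM (what is proved, stated in full; the proofs are below) =====
def Claim_equal_lineInd : Prop := ∀ (start : Int × Int) (end_ : Int × Int), Dom_lineInd start end_ → Pre_lineInd start end_ → Spec_lineInd start end_ (lineInd start end_)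

-- ===== LEMMAS AND PROOFS =====

-- the minimum of the four neighbor distances
def minN (end_ : Int × Int) (p : Int × Int) : Int :=
  min (min (dist2A (p.1 - 1, p.2) end_) (dist2A (p.1 + 1, p.2) end_))
      (min (dist2A (p.1, p.2 - 1) end_) (dist2A (p.1, p.2 + 1) end_))


set_option maxHeartbeats 1000000 in
lemma scan_eq (end_ p : Int × Int) (h : minN end_ p < 1000000) :
    lineIndScan end_ p = (dist2A (lineStep end_ p) end_, some (lineStep end_ p)) := by
  obtain ⟨px, py⟩ := p; obtain ⟨ex, ey⟩ := end_
  simp only [minN, dist2A, min_lt_iff] at h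
  simp only [lineIndScan, orthoNeighborsA, List.foldl, dist2A, lineStep]
  rcases le_or_gt |ey - py| |ex - px| with hxy | hxy
  · rcases le_or_gt (ex - px) 0 with hd | hd
    · -- move left
      have ha : ex - px ≤ ey - py := by
        have := neg_abs_le (ey - py); have := abs_of_nonpos hd; omega
      have hb : ey - py ≤ -(ex - px) := by
        have := le_abs_self (ey - py); have := abs_of_nonpos hd; omega
      rw [if_pos hxy, if_neg (by omega : ¬ (0:Int) < ex - px)]
      split_ifs with h1 h2 h3 h4 h5 h6 h7 h8 <;> simp only [Prod.fst] at * <;>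
        first
          | (simp only [Prod.mk.injEq, Option.some.injEq]; and_intros <;> first | trivial | ring1)
          | (exfalso; rcases h with (h|h)|(h|h) <;> nlinarith)
    · -- move right
      have ha : -(ex - px) ≤ ey - py := by
        have := neg_abs_le (ey - py); have := abs_of_pos hd; omega
      have hb : ey - py ≤ ex - px := by
        have := le_abs_self (ey - py); have := abs_of_pos hd; omega
      rw [if_pos hxy, if_pos hd]
      split_ifs with h1 h2 h3 h4 h5 h6 h7 h8 <;> simp only [Prod.fst] at * <;>
        first
          | (simp only [Prod.mk.injEq, Option.some.injEq]; and_intros <;> first | trivial | ring1)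
          | (exfalso; rcases h with (h|h)|(h|h) <;> nlinarith)
  · rcases le_or_gt (ey - py) 0 with hd | hd
    · -- move down
      have hd' : ey - py < 0 := by
        have := abs_nonneg (ex - px); have := abs_of_nonpos hd; omega
      have ha : ex - px < -(ey - py) := by
        have := le_abs_self (ex - px); have := abs_of_nonpos hd; omega
      have hb : ey - py < ex - px := by
        have := neg_abs_le (ex - px); have := abs_of_nonpos hd; omega
      rw [if_neg (by omega : ¬ |ey - py| ≤ |ex - px|), if_neg (by omega : ¬ (0:Int) < ey - py)]
      split_ifs with h1 h2 h3 h4 h5 h6 h7 h8 <;> simp only [Prod.fst] at * <;>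
        first
          | (simp only [Prod.mk.injEq, Option.some.injEq]; and_intros <;> first | trivial | ring1)
          | (exfalso; rcases h with (h|h)|(h|h) <;> nlinarith)
    · -- move up
      have ha : ex - px < ey - py := by
        have := le_abs_self (ex - px); have := abs_of_pos hd; omega
      have hb : -(ey - py) < ex - px := by
        have := neg_abs_le (ex - px); have := abs_of_pos hd; omega
      rw [if_neg (by omega : ¬ |ey - py| ≤ |ex - px|), if_pos hd]
      split_ifs with h1 h2 h3 h4 h5 h6 h7 h8 <;> simp only [Prod.fst] at * <;>
        first
          | (simp only [Prod.mk.injEq, Option.some.injEq]; and_intros <;> first | trivial | ring1)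
          | (exfalso; rcases h with (h|h)|(h|h) <;> nlinarith)

set_option maxHeartbeats 400000 in
lemma step_dist (end_ p : Int × Int) :
    dist2A (lineStep end_ p) end_ = minN end_ p := by
  obtain ⟨px, py⟩ := p; obtain ⟨ex, ey⟩ := end_
  simp only [minN, dist2A, lineStep]
  set a := (ex - (px - 1)) ^ 2 + (ey - py) ^ 2 with haa
  set b := (ex - (px + 1)) ^ 2 + (ey - py) ^ 2 with hbb
  set c := (ex - px) ^ 2 + (ey - (py - 1)) ^ 2 with hcc
  set d := (ex - px) ^ 2 + (ey - (py + 1)) ^ 2 with hdd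
  rcases le_or_gt |ey - py| |ex - px| with hxy | hxy
  · rcases le_or_gt (ex - px) 0 with hd | hd
    · have ha1 : ex - px ≤ ey - py := by
        have := neg_abs_le (ey - py); have := abs_of_nonpos hd; omega
      have hb1 : ey - py ≤ -(ex - px) := by
        have := le_abs_self (ey - py); have := abs_of_nonpos hd; omega
      rw [if_pos hxy, if_neg (by omega : ¬ (0:Int) < ex - px)]
      have e1 : a - b = 4 * (ex - px) := by rw [haa, hbb]; ring
      have e2 : c - a = 2 * ((ey - py) - (ex - px)) := by rw [hcc, haa]; ring
      have e3 : d - a = -2 * ((ey - py) + (ex - px)) := by rw [hdd, haa]; ring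
      have goal : (ex - (px + -1)) ^ 2 + (ey - py) ^ 2 = a := by rw [haa]; ring
      rw [goal]
      rw [min_def, min_def, min_def]; split_ifs <;> omega
    · have ha1 : -(ex - px) ≤ ey - py := by
        have := neg_abs_le (ey - py); have := abs_of_pos hd; omega
      have hb1 : ey - py ≤ ex - px := by
        have := le_abs_self (ey - py); have := abs_of_pos hd; omega
      rw [if_pos hxy, if_pos hd]
      have e1 : a - b = 4 * (ex - px) := by rw [haa, hbb]; ring
      have e2 : c - b = 2 * ((ey - py) + (ex - px)) := by rw [hcc, hbb]; ring
      have e3 : d - b = -2 * ((ey - py) - (ex - px)) := by rw [hdd, hbb]; ring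
      have goal : (ex - (px + 1)) ^ 2 + (ey - py) ^ 2 = b := by rw [hbb]
      rw [goal]
      rw [min_def, min_def, min_def]; split_ifs <;> omega
  · rcases le_or_gt (ey - py) 0 with hd | hd
    · have ha1 : ey - py ≤ ex - px := by
        have := neg_abs_le (ex - px); have := abs_of_nonpos hd; omega
      have hb1 : ex - px ≤ -(ey - py) := by
        have := le_abs_self (ex - px); have := abs_of_nonpos hd; omega
      rw [if_neg (by omega : ¬ |ey - py| ≤ |ex - px|), if_neg (by omega : ¬ (0:Int) < ey - py)]
      have e1 : c - d = 4 * (ey - py) := by rw [hcc, hdd]; ring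
      have e2 : a - c = 2 * ((ex - px) - (ey - py)) := by rw [haa, hcc]; ring
      have e3 : b - c = -2 * ((ex - px) + (ey - py)) := by rw [hbb, hcc]; ring
      have goal : (ex - px) ^ 2 + (ey - (py + -1)) ^ 2 = c := by rw [hcc]; ring
      rw [goal]
      rw [min_def, min_def, min_def]; split_ifs <;> omega
    · have ha1 : -(ey - py) ≤ ex - px := by
        have := neg_abs_le (ex - px); have := abs_of_pos hd; omega
      have hb1 : ex - px ≤ ey - py := by
        have := le_abs_self (ex - px); have := abs_of_pos hd; omega
      rw [if_neg (by omega : ¬ |ey - py| ≤ |ex - px|), if_pos hd]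
      have e1 : c - d = 4 * (ey - py) := by rw [hcc, hdd]; ring
      have e2 : a - d = 2 * ((ex - px) + (ey - py)) := by rw [haa, hdd]; ring
      have e3 : b - d = -2 * ((ex - px) - (ey - py)) := by rw [hbb, hdd]; ring
      have goal : (ex - px) ^ 2 + (ey - (py + 1)) ^ 2 = d := by rw [hdd]
      rw [goal]
      rw [min_def, min_def, min_def]; split_ifs <;> omega

lemma minN_lt_dist2 (end_ p : Int × Int) (h : p ≠ end_) :
    minN end_ p < dist2A p end_ := by
  obtain ⟨px, py⟩ := p; obtain ⟨ex, ey⟩ := end_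
  have hne : ex - px ≠ 0 ∨ ey - py ≠ 0 := by
    by_contra hc; push_neg at hc
    exact h (by simp [Prod.ext_iff]; omega)
  simp only [minN, dist2A]
  set a := (ex - (px - 1)) ^ 2 + (ey - py) ^ 2 with haa
  set b := (ex - (px + 1)) ^ 2 + (ey - py) ^ 2 with hbb
  set c := (ex - px) ^ 2 + (ey - (py - 1)) ^ 2 with hcc
  set d := (ex - px) ^ 2 + (ey - (py + 1)) ^ 2 with hdd
  set e := (ex - px) ^ 2 + (ey - py) ^ 2 with hee
  have e1 : a = e + 2 * (ex - px) + 1 := by rw [haa, hee]; ring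
  have e2 : b = e - 2 * (ex - px) + 1 := by rw [hbb, hee]; ring
  have e3 : c = e + 2 * (ey - py) + 1 := by rw [hcc, hee]; ring
  have e4 : d = e - 2 * (ey - py) + 1 := by rw [hdd, hee]; ring
  rw [min_def, min_def, min_def]; split_ifs <;> omega

lemma pre_minN (start end_ : Int × Int) (h : Pre_lineInd start end_) (hne : start ≠ end_) :
    minN end_ start < 1000000 := by
  rcases h with h | h
  · exact absurd h hne
  · have : minN end_ start =
        min (min ((end_.1 - start.1 + 1) ^ 2 + (end_.2 - start.2) ^ 2)
                 ((end_.1 - start.1 - 1) ^ 2 + (end_.2 - start.2) ^ 2))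
            (min ((end_.1 - start.1) ^ 2 + (end_.2 - start.2 + 1) ^ 2)
                 ((end_.1 - start.1) ^ 2 + (end_.2 - start.2 - 1) ^ 2)) := by
      unfold minN dist2A
      congr 1 <;> congr 1 <;> ring
    omega

lemma go_eq (end_ : Int × Int) :
    ∀ (fuel : Nat) (p : Int × Int) (acc : List (Int × Int)),
      (p ≠ end_ → minN end_ p < 1000000) →
      lineIndGo end_ fuel p acc = lineIndAltGo end_ fuel p acc := by
  intro fuel
  induction fuel with
  | zero =>
    intro p acc _
    simp only [lineIndGo, lineIndAltGo]
  | succ n ih =>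
    intro p acc hP
    by_cases hp : p = end_
    · simp only [lineIndGo, lineIndAltGo, if_pos hp]
    · have hmin : minN end_ p < 1000000 := hP hp
      simp only [lineIndGo, lineIndAltGo, if_neg hp, scan_eq end_ p hmin]
      apply ih
      intro hne
      have h1 := step_dist end_ p
      have h2 := minN_lt_dist2 end_ (lineStep end_ p) hne
      omega

-- ===== VERDICT (by name: the statement is the Claim_ definition above) =====
theorem lineInd_spec : Claim_equal_lineInd := by
  intro start end_ _ hpre
  unfold Spec_lineInd lineInd lineInd_alt
  apply go_eq
  intro hne
  exact pre_minN start end_ hpre hne
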